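-- pv_equiv track=rewrite | github.com/suyash456/MultiModal-Math-Mentor- | src/multimodal/audio_processor.py | normalize_math_phrases
-- ===== SOURCE A (Python) =====
-- def normalize_math_phrases(text: str) -> str:
--     """Normalize math-specific phrases in transcript."""
--     replacements = {
--         "square root of": "√",
--         "raised to": "^",
--         "to the power of": "^",
--         "divided by": "/",
--         "times": "*",
--         "multiplied by": "*",
--     }
--
--     normalized = text
--     for phrase, symbol in replacements.items():
--         normalized = normalized.replace(phrase, symbol)
--
--     return normalized
-- ===== SOURCE B (Python) =====
-- import re
--
-- _REPLACEMENTS = {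
--     "square root of": "√",
--     "raised to": "^",
--     "to the power of": "^",
--     "divided by": "/",
--     "times": "*",
--     "multiplied by": "*",
-- }
-- _PATTERN = re.compile("|".join(re.escape(p) for p in _REPLACEMENTS))
--
--
-- def normalize_math_phrases(text: str) -> str:
--     """Normalize math-specific phrases in transcript (single left-to-right pass)."""
--     return _PATTERN.sub(lambda m: _REPLACEMENTS[m.group(0)], text)
-- ===== Notes on version B (the rewrite author's own statement) =====
-- stated objective: alternative
-- what changed: B replaces A's six sequential full-string str.replace passes by one compiled alternation regex doing a single left-to-right scan with first-match-wins resolution; Pre_ excludes texts containing "timesquare root of", where an occurrence of "times" overlaps an occurrence of "square root of" and which of the two overlapping phrases wins is an accidental tie (A's pass order picks "square root of", B's leftmost scan picks "times").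
-- outside the precondition, e.g. on normalize_math_phrases('timesquare root of'): A returns 'time√', B returns '*quare root of'
import Mathlib
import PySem

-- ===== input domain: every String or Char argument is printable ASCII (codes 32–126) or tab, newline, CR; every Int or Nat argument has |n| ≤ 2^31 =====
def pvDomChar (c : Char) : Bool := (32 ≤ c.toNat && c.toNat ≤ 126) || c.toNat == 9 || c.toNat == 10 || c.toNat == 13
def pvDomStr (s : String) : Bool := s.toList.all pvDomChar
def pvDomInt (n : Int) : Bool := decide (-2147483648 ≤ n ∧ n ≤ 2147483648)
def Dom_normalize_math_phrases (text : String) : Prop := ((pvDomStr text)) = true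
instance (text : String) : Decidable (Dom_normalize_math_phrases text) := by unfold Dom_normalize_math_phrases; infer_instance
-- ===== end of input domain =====

-- B replaces A's six sequential full-string replace passes by one left-to-right
-- alternation scan (a compiled regex in Python); equal on all texts not containing
-- "timesquare root of" (there the two overlapping phrases are resolved differently).


-- ===== PORT A =====
-- the dict literal (distinct keys) and the for-loop over .items(), one replace per pass
def normalize_math_phrases (text : String) : String :=
  let replacements : PySem.Dict String String := PySem.Dict.mk
    [("square root of", "√"), ("raised to", "^"), ("to the power of", "^"),
     ("divided by", "/"), ("times", "*"), ("multiplied by", "*")]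
  replacements.items.foldl (fun normalized pr => PySem.Str.replace normalized pr.1 pr.2) text

-- ===== PORT B =====
-- B-side helper: the scan performed by _PATTERN.sub — at each position the literal
-- alternatives are tried in pattern (= dict) order, the first match emits its dict
-- symbol and the scan resumes after the match, otherwise one char is copied.
def pyScanSub : List Char → List Char
  | [] => []
  | c :: t =>
    if ("square root of".toList).isPrefixOf (c :: t) then '√' :: pyScanSub (t.drop 13)
    else if ("raised to".toList).isPrefixOf (c :: t) then '^' :: pyScanSub (t.drop 8)
    else if ("to the power of".toList).isPrefixOf (c :: t) then '^' :: pyScanSub (t.drop 14)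
    else if ("divided by".toList).isPrefixOf (c :: t) then '/' :: pyScanSub (t.drop 9)
    else if ("times".toList).isPrefixOf (c :: t) then '*' :: pyScanSub (t.drop 4)
    else if ("multiplied by".toList).isPrefixOf (c :: t) then '*' :: pyScanSub (t.drop 12)
    else c :: pyScanSub t
termination_by cs => cs.length
decreasing_by all_goals (simp only [List.length_drop, List.length_cons]; omega)

def normalize_math_phrases_alt (text : String) : String :=
  String.ofList (pyScanSub text.toList)

-- ===== PRECONDITION & SPEC =====
-- Pre_ excludes texts containing "timesquare root of": there an occurrence of "times"
-- overlaps an occurrence of "square root of" and which phrase wins is an accidental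
-- tie (A's pass order picks "square root of", B's leftmost scan picks "times").
def Pre_normalize_math_phrases (text : String) : Prop :=
  PySem.Str.isIn "timesquare root of" text = false
instance (text : String) : Decidable (Pre_normalize_math_phrases text) := by
  unfold Pre_normalize_math_phrases; infer_instance

def pvWitness_normalize_math_phrases : String := "3 times the square root of 2 divided by x"

def Spec_normalize_math_phrases (text : String) (out : String) : Prop :=
  out = normalize_math_phrases_alt text
instance (text : String) (out : String) : Decidable (Spec_normalize_math_phrases text out) := by
  unfold Spec_normalize_math_phrases; infer_instance

-- ===== CLAIM (what is proved, stated in full; the proofs are below) =====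
def Claim_equal_normalize_math_phrases : Prop :=
  ∀ (text : String), Dom_normalize_math_phrases text → Pre_normalize_math_phrases text →
    Spec_normalize_math_phrases text (normalize_math_phrases text)

-- ===== LEMMAS AND PROOFS =====

-- the string on which the two overlap resolutions disagree
def pvBad : List Char := "timesquare root of".toList

-- the ordered phrase/symbol table shared by the analysis
def pvLP : List (List Char × Char) :=
  [("square root of".toList, '√'), ("raised to".toList, '^'), ("to the power of".toList, '^'),
   ("divided by".toList, '/'), ("times".toList, '*'), ("multiplied by".toList, '*')]

-- structural form of one full str.replace pass (proved equal to PySem.Chars.replace below)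
def pvRep (old new : List Char) : List Char → List Char
  | [] => []
  | c :: t =>
    if old.isPrefixOf (c :: t) then new ++ pvRep old new (t.drop (old.length - 1))
    else c :: pvRep old new t
termination_by cs => cs.length
decreasing_by all_goals (simp only [List.length_drop, List.length_cons]; omega)

def pvComp (L : List (List Char × Char)) (s : List Char) : List Char :=
  L.foldl (fun acc pr => pvRep pr.1 [pr.2] acc) s

theorem pvRep_nil (old new : List Char) : pvRep old new [] = [] := by
  simp [pvRep]

theorem pvRep_cons_neg (old new : List Char) (c : Char) (t : List Char)
    (h : ¬ old <+: c :: t) : pvRep old new (c :: t) = c :: pvRep old new t := by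
  rw [pvRep]
  simp [List.isPrefixOf_iff_prefix, h]

theorem pvRep_pos (old new s : List Char) (h : old <+: s) (hold : old ≠ []) (hs : s ≠ []) :
    pvRep old new s = new ++ pvRep old new (s.drop old.length) := by
  match s with
  | [] => exact absurd rfl hs
  | c :: t =>
    rw [pvRep]
    simp only [List.isPrefixOf_iff_prefix, h, if_true]
    congr 2
    obtain ⟨k, hk⟩ : ∃ k, old.length = k + 1 := by
      cases old with
      | nil => exact absurd rfl hold
      | cons a l => exact ⟨l.length, rfl⟩
    rw [hk]
    simp

theorem pvGo_eq (old new : List Char) (hold : old ≠ []) :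
    ∀ (fuel : Nat) (s acc : List Char), s.length ≤ fuel →
      PySem.Chars.replace.go old new fuel s acc = acc.reverse ++ pvRep old new s := by
  intro fuel
  induction fuel with
  | zero =>
    intro s acc h
    have hs : s = [] := List.eq_nil_of_length_eq_zero (Nat.le_zero.mp h)
    subst hs
    rw [PySem.Chars.replace.go.eq_def]
    simp [pvRep_nil]
  | succ n ih =>
    intro s acc h
    match s with
    | [] =>
      rw [PySem.Chars.replace.go.eq_def]
      simp [pvRep_nil]
    | c :: t =>
      rw [PySem.Chars.replace.go.eq_def]
      simp only []
      by_cases hp : old.isPrefixOf (c :: t)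
      · rw [if_pos hp]
        have hlen : (List.drop old.length (c :: t)).length ≤ n := by
          have h1 : 1 ≤ old.length := by
            cases old with
            | nil => exact absurd rfl hold
            | cons a l => simp
          have h2 : t.length + 1 ≤ n + 1 := by simpa using h
          simp only [List.length_drop, List.length_cons]
          omega
        rw [ih _ _ hlen]
        rw [pvRep_pos old new (c :: t) (List.isPrefixOf_iff_prefix.mp hp) hold (by simp)]
        simp
      · rw [if_neg hp]
        have hlen : t.length ≤ n := by simpa using h
        rw [ih _ _ hlen]
        rw [pvRep_cons_neg old new c t (fun hc => hp (List.isPrefixOf_iff_prefix.mpr hc))]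
        simp

theorem pvReplace_eq (s old new : List Char) (hold : old ≠ []) :
    PySem.Chars.replace s old new = pvRep old new s := by
  unfold PySem.Chars.replace
  rw [if_neg (by simpa using hold)]
  simpa using pvGo_eq old new hold s.length s [] le_rfl

-- a symbol-free prefix of a replaced string was already a prefix before the pass
theorem pvPrefix_rep (old : List Char) (a : Char) :
    ∀ (s w : List Char), a ∉ w → old ≠ [] → w <+: pvRep old [a] s → w <+: s := by
  have key : ∀ (n : Nat) (s : List Char), s.length ≤ n → ∀ w, a ∉ w → old ≠ [] →
      w <+: pvRep old [a] s → w <+: s := by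
    intro n
    induction n with
    | zero =>
      intro s hs w ha hold hw
      have hnil : s = [] := by cases s <;> simp_all
      subst hnil
      rw [pvRep_nil, List.prefix_nil] at hw
      subst hw
      exact List.nil_prefix
    | succ n ih =>
      intro s hs w ha hold hw
      match s with
      | [] =>
        rw [pvRep_nil, List.prefix_nil] at hw
        subst hw
        exact List.nil_prefix
      | c :: t =>
        by_cases hp : old <+: c :: t
        · rw [pvRep_pos old [a] (c :: t) hp hold (by simp)] at hw
          match w with
          | [] => exact List.nil_prefix
          | b :: w' =>
            simp only [List.singleton_append, List.cons_prefix_cons] at hw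
            exact absurd hw.1 (by rintro rfl; exact ha (by simp))
        · rw [pvRep_cons_neg old [a] c t hp] at hw
          match w with
          | [] => exact List.nil_prefix
          | b :: w' =>
            rw [List.cons_prefix_cons] at hw
            have ht : t.length ≤ n := by simpa using hs
            have := ih t ht w' (fun hm => ha (by simp [hm])) hold hw.2
            exact List.cons_prefix_cons.mpr ⟨hw.1, this⟩
  intro s w ha hold hw
  exact key s.length s le_rfl w ha hold hw

theorem pvRep_append (old new : List Char) :
    ∀ (u Z : List Char), (∀ j, j < u.length → ¬ old <+: (u.drop j ++ Z)) →
      pvRep old new (u ++ Z) = u ++ pvRep old new Z := by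
  intro u
  induction u with
  | nil => intro Z _; simp
  | cons c u' ih =>
    intro Z h
    have h0 : ¬ old <+: c :: (u' ++ Z) := by
      have := h 0 (by simp)
      simpa using this
    rw [List.cons_append, pvRep_cons_neg old new c (u' ++ Z) h0]
    rw [ih Z (fun j hj => by simpa using h (j + 1) (by simpa using Nat.succ_lt_succ hj))]
    simp

theorem pvComp_cons (L : List (List Char × Char)) :
    ∀ (c : Char) (t : List Char), (∀ pr ∈ L, pr.1 ≠ []) →
      (∀ pr ∈ L, ∀ pr' ∈ L, pr.2 ∉ pr'.1) →
      (∀ pr ∈ L, ¬ pr.1 <+: c :: t) →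
      pvComp L (c :: t) = c :: pvComp L t := by
  induction L with
  | nil => intro c t _ _ _; simp [pvComp]
  | cons x L ih =>
    intro c t hne hsym h
    have hx : pvRep x.1 [x.2] (c :: t) = c :: pvRep x.1 [x.2] t :=
      pvRep_cons_neg x.1 [x.2] c t (h x (by simp))
    have hstep : pvComp (x :: L) (c :: t) = pvComp L (c :: pvRep x.1 [x.2] t) := by
      simp [pvComp, List.foldl, hx]
    rw [hstep]
    rw [ih c (pvRep x.1 [x.2] t) (fun pr hpr => hne pr (by simp [hpr]))
      (fun pr hpr pr' hpr' => hsym pr (by simp [hpr]) pr' (by simp [hpr'])) ?_]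
    · simp [pvComp, List.foldl]
    · intro pr hpr hpre
      match hp : pr.1, hpre with
      | d :: w, hpre =>
        rw [List.cons_prefix_cons] at hpre
        have hw : w <+: t := by
          refine pvPrefix_rep x.1 x.2 t w ?_ (hne x (by simp)) hpre.2
          intro hm
          exact hsym x (by simp) pr (by simp [hpr]) (by rw [hp]; simp [hm])
        exact h pr (by simp [hpr]) (by rw [hp, hpre.1]; exact List.cons_prefix_cons.mpr ⟨rfl, hw⟩)
      | [], _ => exact hne pr (by simp [hpr]) hp

theorem pvComp_symbol_cons (L : List (List Char × Char)) (y : Char) :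
    ∀ (W : List Char), (∀ pr ∈ L, pr.1 ≠ []) → (∀ pr ∈ L, pr.1.head? ≠ some y) →
      pvComp L (y :: W) = y :: pvComp L W := by
  induction L with
  | nil => intro W _ _; simp [pvComp]
  | cons x L ih =>
    intro W hne hy
    have hx : pvRep x.1 [x.2] (y :: W) = y :: pvRep x.1 [x.2] W := by
      refine pvRep_cons_neg x.1 [x.2] y W ?_
      intro hpre
      match hp : x.1, hpre with
      | d :: w, hpre =>
        rw [List.cons_prefix_cons] at hpre
        exact hy x (by simp) (by rw [hp, hpre.1]; rfl)
      | [], _ => exact hne x (by simp) hp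
    have hstep : pvComp (x :: L) (y :: W) = pvComp L (y :: pvRep x.1 [x.2] W) := by
      simp [pvComp, List.foldl, hx]
    rw [hstep, ih (pvRep x.1 [x.2] W) (fun pr hpr => hne pr (by simp [hpr]))
      (fun pr hpr => hy pr (by simp [hpr]))]
    simp [pvComp, List.foldl]

theorem pvComp_L1 (L1 : List (List Char × Char)) (pk : List Char) :
    ∀ (u : List Char), (∀ pr ∈ L1, pr.1 ≠ []) →
      (∀ pr ∈ L1, ∀ pr' ∈ L1, pr.2 ∉ pr'.1) →
      (∀ pr ∈ L1, ∀ j, j < pk.length → ¬ pr.1 <+: (pk.drop j ++ u)) →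
      pvComp L1 (pk ++ u) = pk ++ pvComp L1 u := by
  induction L1 with
  | nil => intro u _ _ _; simp [pvComp]
  | cons x L1 ih =>
    intro u hne hsym Hin
    have hx : pvRep x.1 [x.2] (pk ++ u) = pk ++ pvRep x.1 [x.2] u := by
      refine pvRep_append x.1 [x.2] pk u ?_
      intro j hj
      exact Hin x (by simp) j hj
    have hstep : pvComp (x :: L1) (pk ++ u) = pvComp L1 (pk ++ pvRep x.1 [x.2] u) := by
      simp [pvComp, List.foldl, hx]
    rw [hstep]
    rw [ih (pvRep x.1 [x.2] u) (fun pr hpr => hne pr (by simp [hpr]))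
      (fun pr hpr pr' hpr' => hsym pr (by simp [hpr]) pr' (by simp [hpr'])) ?_]
    · simp [pvComp, List.foldl]
    · intro pr hpr j hj hpre
      have hd : pk.drop j <+: pk.drop j ++ pvRep x.1 [x.2] u := List.prefix_append _ _
      rcases List.prefix_or_prefix_of_prefix hpre hd with hc | hc
      · exact Hin pr (by simp [hpr]) j hj (hc.trans (List.prefix_append _ _))
      · have heq : pk.drop j ++ pr.1.drop (pk.drop j).length = pr.1 := List.prefix_iff_eq_append.mp hc
        have hwrep : pr.1.drop (pk.drop j).length <+: pvRep x.1 [x.2] u := by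
          have := hpre
          rw [← heq] at this
          exact (List.prefix_append_right_inj (pk.drop j)).mp this
        have hw : pr.1.drop (pk.drop j).length <+: u := by
          refine pvPrefix_rep x.1 x.2 u _ ?_ (hne x (by simp)) hwrep
          intro hm
          exact hsym x (by simp) pr (by simp [hpr]) (List.drop_subset _ _ hm)
        refine Hin pr (by simp [hpr]) j hj ?_
        rw [← heq]
        exact (List.prefix_append_right_inj (pk.drop j)).mpr hw

theorem pvComp_match (L1 L2 : List (List Char × Char)) (pk : List Char) (yk : Char)
    (u : List Char) (hpk : pk ≠ [])
    (hne1 : ∀ pr ∈ L1, pr.1 ≠ []) (hne2 : ∀ pr ∈ L2, pr.1 ≠ [])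
    (hsym1 : ∀ pr ∈ L1, ∀ pr' ∈ L1, pr.2 ∉ pr'.1)
    (hy2 : ∀ pr ∈ L2, pr.1.head? ≠ some yk)
    (Hin : ∀ pr ∈ L1, ∀ j, j < pk.length → ¬ pr.1 <+: (pk.drop j ++ u)) :
    pvComp (L1 ++ (pk, yk) :: L2) (pk ++ u) = yk :: pvComp (L1 ++ (pk, yk) :: L2) u := by
  have hsplit : ∀ s, pvComp (L1 ++ (pk, yk) :: L2) s
      = pvComp L2 (pvRep pk [yk] (pvComp L1 s)) := by
    intro s
    simp [pvComp, List.foldl_append, List.foldl]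
  rw [hsplit, hsplit]
  rw [pvComp_L1 L1 pk u hne1 hsym1 Hin]
  have hrep : pvRep pk [yk] (pk ++ pvComp L1 u)
      = yk :: pvRep pk [yk] (pvComp L1 u) := by
    rw [pvRep_pos pk [yk] (pk ++ pvComp L1 u) (List.prefix_append _ _) hpk
      (by intro h; exact hpk (by simpa using List.append_eq_nil_iff.mp h |>.1))]
    simp
  rw [hrep]
  exact pvComp_symbol_cons L2 yk (pvRep pk [yk] (pvComp L1 u)) hne2 hy2

-- inner-position exclusion: under Pre_, no earlier-pass phrase starts inside a matched phrase
theorem pvHin_of (pk pi u : List Char)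
    (hground : ∀ j, j < pk.length →
      ¬ pi <+: pk.drop j ∧ (pk.drop j <+: pi → pk ++ pi.drop (pk.length - j) = pvBad))
    (hbad : ¬ pvBad <:+: pk ++ u) :
    ∀ j, j < pk.length → ¬ pi <+: (pk.drop j ++ u) := by
  intro j hj hpre
  have hd : pk.drop j <+: pk.drop j ++ u := List.prefix_append _ _
  rcases List.prefix_or_prefix_of_prefix hpre hd with hc | hc
  · exact (hground j hj).1 hc
  · have heq : pk.drop j ++ pi.drop (pk.drop j).length = pi := List.prefix_iff_eq_append.mp hc
    have hlen : (pk.drop j).length = pk.length - j := List.length_drop ..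
    have hbadval : pk ++ pi.drop (pk.length - j) = pvBad := (hground j hj).2 hc
    have hw : pi.drop (pk.drop j).length <+: u := by
      have := hpre
      rw [← heq] at this
      exact (List.prefix_append_right_inj (pk.drop j)).mp this
    refine hbad ?_
    refine List.IsPrefix.isInfix ?_
    rw [← hbadval, hlen] at *
    exact (List.prefix_append_right_inj pk).mpr (hlen ▸ hw)

theorem pvMainAux : ∀ (n : Nat) (s : List Char), s.length ≤ n → ¬ pvBad <:+: s →
    pvComp pvLP s = pyScanSub s := by
  intro n
  induction n with
  | zero =>
    intro s hlen hbad
    have hs : s = [] := by cases s <;> simp_all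
    subst hs
    simp [pvComp, pvLP, List.foldl, pvRep_nil, pyScanSub]
  | succ n ih =>
    intro s hlen hbad
    match s with
    | [] => simp [pvComp, pvLP, List.foldl, pvRep_nil, pyScanSub]
    | c :: t =>
      by_cases h1 : "square root of".toList <+: c :: t
      · -- phrase 1 matches at the head
        have hs : "square root of".toList ++ (c :: t).drop ("square root of".toList).length = c :: t :=
          List.prefix_iff_eq_append.mp h1
        have hu : (c :: t).drop (("square root of".toList).length) = t.drop 13 := by
          rw [(by decide : ("square root of".toList).length = 14)]
          simp
        have hbadu : ¬ pvBad <:+: (c :: t).drop (("square root of".toList).length) := by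
          intro hcon
          exact hbad (hcon.trans (List.IsSuffix.isInfix (List.drop_suffix _ _)))
        have hbads : ¬ pvBad <:+: "square root of".toList ++ (c :: t).drop (("square root of".toList).length) := by
          rw [hs]; exact hbad
        have Hin : ∀ pr ∈ ([] : List (List Char × Char)), ∀ j, j < ("square root of".toList).length →
            ¬ pr.1 <+: (("square root of".toList).drop j ++ (c :: t).drop (("square root of".toList).length)) := by
          intro pr hpr; simp at hpr
        have hcomp : pvComp pvLP (c :: t) = '√' :: pvComp pvLP ((c :: t).drop (("square root of".toList).length)) := by
          conv_lhs => rw [← hs]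
          exact pvComp_match [] [("raised to".toList, '^'), ("to the power of".toList, '^'), ("divided by".toList, '/'), ("times".toList, '*'), ("multiplied by".toList, '*')] "square root of".toList '√' _
            (by decide) (by decide) (by decide) (by decide) (by decide) Hin
        have hscan : pyScanSub (c :: t) = '√' :: pyScanSub (t.drop 13) := by
          rw [pyScanSub]
          simp only [List.isPrefixOf_iff_prefix]
          rw [if_pos (by simpa using h1)]
        rw [hcomp, hscan, hu]
        congr 1
        refine ih (t.drop 13) ?_ ?_
        · have h' : t.length ≤ n := by simpa using hlen
          have hd : (t.drop 13).length = t.length - 13 := List.length_drop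
          omega
        · rw [← hu]; exact hbadu
      by_cases h2 : "raised to".toList <+: c :: t
      · -- phrase 2 matches at the head
        have hs : "raised to".toList ++ (c :: t).drop ("raised to".toList).length = c :: t :=
          List.prefix_iff_eq_append.mp h2
        have hu : (c :: t).drop (("raised to".toList).length) = t.drop 8 := by
          rw [(by decide : ("raised to".toList).length = 9)]
          simp
        have hbadu : ¬ pvBad <:+: (c :: t).drop (("raised to".toList).length) := by
          intro hcon
          exact hbad (hcon.trans (List.IsSuffix.isInfix (List.drop_suffix _ _)))
        have hbads : ¬ pvBad <:+: "raised to".toList ++ (c :: t).drop (("raised to".toList).length) := by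
          rw [hs]; exact hbad
        have Hin : ∀ pr ∈ ([("square root of".toList, '√')] : List (List Char × Char)), ∀ j, j < ("raised to".toList).length →
            ¬ pr.1 <+: (("raised to".toList).drop j ++ (c :: t).drop (("raised to".toList).length)) := by
          intro pr hpr
          simp only [List.mem_cons, List.not_mem_nil, or_false] at hpr
          rcases hpr with rfl
          · exact pvHin_of "raised to".toList "square root of".toList _ (by decide) hbads
        have hcomp : pvComp pvLP (c :: t) = '^' :: pvComp pvLP ((c :: t).drop (("raised to".toList).length)) := by
          conv_lhs => rw [← hs]
          exact pvComp_match [("square root of".toList, '√')] [("to the power of".toList, '^'), ("divided by".toList, '/'), ("times".toList, '*'), ("multiplied by".toList, '*')] "raised to".toList '^' _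
            (by decide) (by decide) (by decide) (by decide) (by decide) Hin
        have hscan : pyScanSub (c :: t) = '^' :: pyScanSub (t.drop 8) := by
          rw [pyScanSub]
          simp only [List.isPrefixOf_iff_prefix]
          rw [if_neg (by simpa using h1)]
          rw [if_pos (by simpa using h2)]
        rw [hcomp, hscan, hu]
        congr 1
        refine ih (t.drop 8) ?_ ?_
        · have h' : t.length ≤ n := by simpa using hlen
          have hd : (t.drop 8).length = t.length - 8 := List.length_drop
          omega
        · rw [← hu]; exact hbadu
      by_cases h3 : "to the power of".toList <+: c :: t
      · -- phrase 3 matches at the head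
        have hs : "to the power of".toList ++ (c :: t).drop ("to the power of".toList).length = c :: t :=
          List.prefix_iff_eq_append.mp h3
        have hu : (c :: t).drop (("to the power of".toList).length) = t.drop 14 := by
          rw [(by decide : ("to the power of".toList).length = 15)]
          simp
        have hbadu : ¬ pvBad <:+: (c :: t).drop (("to the power of".toList).length) := by
          intro hcon
          exact hbad (hcon.trans (List.IsSuffix.isInfix (List.drop_suffix _ _)))
        have hbads : ¬ pvBad <:+: "to the power of".toList ++ (c :: t).drop (("to the power of".toList).length) := by
          rw [hs]; exact hbad
        have Hin : ∀ pr ∈ ([("square root of".toList, '√'), ("raised to".toList, '^')] : List (List Char × Char)), ∀ j, j < ("to the power of".toList).length →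
            ¬ pr.1 <+: (("to the power of".toList).drop j ++ (c :: t).drop (("to the power of".toList).length)) := by
          intro pr hpr
          simp only [List.mem_cons, List.not_mem_nil, or_false] at hpr
          rcases hpr with rfl|rfl
          · exact pvHin_of "to the power of".toList "square root of".toList _ (by decide) hbads
          · exact pvHin_of "to the power of".toList "raised to".toList _ (by decide) hbads
        have hcomp : pvComp pvLP (c :: t) = '^' :: pvComp pvLP ((c :: t).drop (("to the power of".toList).length)) := by
          conv_lhs => rw [← hs]
          exact pvComp_match [("square root of".toList, '√'), ("raised to".toList, '^')] [("divided by".toList, '/'), ("times".toList, '*'), ("multiplied by".toList, '*')] "to the power of".toList '^' _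
            (by decide) (by decide) (by decide) (by decide) (by decide) Hin
        have hscan : pyScanSub (c :: t) = '^' :: pyScanSub (t.drop 14) := by
          rw [pyScanSub]
          simp only [List.isPrefixOf_iff_prefix]
          rw [if_neg (by simpa using h1)]
          rw [if_neg (by simpa using h2)]
          rw [if_pos (by simpa using h3)]
        rw [hcomp, hscan, hu]
        congr 1
        refine ih (t.drop 14) ?_ ?_
        · have h' : t.length ≤ n := by simpa using hlen
          have hd : (t.drop 14).length = t.length - 14 := List.length_drop
          omega
        · rw [← hu]; exact hbadu
      by_cases h4 : "divided by".toList <+: c :: t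
      · -- phrase 4 matches at the head
        have hs : "divided by".toList ++ (c :: t).drop ("divided by".toList).length = c :: t :=
          List.prefix_iff_eq_append.mp h4
        have hu : (c :: t).drop (("divided by".toList).length) = t.drop 9 := by
          rw [(by decide : ("divided by".toList).length = 10)]
          simp
        have hbadu : ¬ pvBad <:+: (c :: t).drop (("divided by".toList).length) := by
          intro hcon
          exact hbad (hcon.trans (List.IsSuffix.isInfix (List.drop_suffix _ _)))
        have hbads : ¬ pvBad <:+: "divided by".toList ++ (c :: t).drop (("divided by".toList).length) := by
          rw [hs]; exact hbad
        have Hin : ∀ pr ∈ ([("square root of".toList, '√'), ("raised to".toList, '^'), ("to the power of".toList, '^')] : List (List Char × Char)), ∀ j, j < ("divided by".toList).length →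
            ¬ pr.1 <+: (("divided by".toList).drop j ++ (c :: t).drop (("divided by".toList).length)) := by
          intro pr hpr
          simp only [List.mem_cons, List.not_mem_nil, or_false] at hpr
          rcases hpr with rfl|rfl|rfl
          · exact pvHin_of "divided by".toList "square root of".toList _ (by decide) hbads
          · exact pvHin_of "divided by".toList "raised to".toList _ (by decide) hbads
          · exact pvHin_of "divided by".toList "to the power of".toList _ (by decide) hbads
        have hcomp : pvComp pvLP (c :: t) = '/' :: pvComp pvLP ((c :: t).drop (("divided by".toList).length)) := by
          conv_lhs => rw [← hs]
          exact pvComp_match [("square root of".toList, '√'), ("raised to".toList, '^'), ("to the power of".toList, '^')] [("times".toList, '*'), ("multiplied by".toList, '*')] "divided by".toList '/' _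
            (by decide) (by decide) (by decide) (by decide) (by decide) Hin
        have hscan : pyScanSub (c :: t) = '/' :: pyScanSub (t.drop 9) := by
          rw [pyScanSub]
          simp only [List.isPrefixOf_iff_prefix]
          rw [if_neg (by simpa using h1)]
          rw [if_neg (by simpa using h2)]
          rw [if_neg (by simpa using h3)]
          rw [if_pos (by simpa using h4)]
        rw [hcomp, hscan, hu]
        congr 1
        refine ih (t.drop 9) ?_ ?_
        · have h' : t.length ≤ n := by simpa using hlen
          have hd : (t.drop 9).length = t.length - 9 := List.length_drop
          omega
        · rw [← hu]; exact hbadu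
      by_cases h5 : "times".toList <+: c :: t
      · -- phrase 5 matches at the head
        have hs : "times".toList ++ (c :: t).drop ("times".toList).length = c :: t :=
          List.prefix_iff_eq_append.mp h5
        have hu : (c :: t).drop (("times".toList).length) = t.drop 4 := by
          rw [(by decide : ("times".toList).length = 5)]
          simp
        have hbadu : ¬ pvBad <:+: (c :: t).drop (("times".toList).length) := by
          intro hcon
          exact hbad (hcon.trans (List.IsSuffix.isInfix (List.drop_suffix _ _)))
        have hbads : ¬ pvBad <:+: "times".toList ++ (c :: t).drop (("times".toList).length) := by
          rw [hs]; exact hbad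
        have Hin : ∀ pr ∈ ([("square root of".toList, '√'), ("raised to".toList, '^'), ("to the power of".toList, '^'), ("divided by".toList, '/')] : List (List Char × Char)), ∀ j, j < ("times".toList).length →
            ¬ pr.1 <+: (("times".toList).drop j ++ (c :: t).drop (("times".toList).length)) := by
          intro pr hpr
          simp only [List.mem_cons, List.not_mem_nil, or_false] at hpr
          rcases hpr with rfl|rfl|rfl|rfl
          · exact pvHin_of "times".toList "square root of".toList _ (by decide) hbads
          · exact pvHin_of "times".toList "raised to".toList _ (by decide) hbads
          · exact pvHin_of "times".toList "to the power of".toList _ (by decide) hbads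
          · exact pvHin_of "times".toList "divided by".toList _ (by decide) hbads
        have hcomp : pvComp pvLP (c :: t) = '*' :: pvComp pvLP ((c :: t).drop (("times".toList).length)) := by
          conv_lhs => rw [← hs]
          exact pvComp_match [("square root of".toList, '√'), ("raised to".toList, '^'), ("to the power of".toList, '^'), ("divided by".toList, '/')] [("multiplied by".toList, '*')] "times".toList '*' _
            (by decide) (by decide) (by decide) (by decide) (by decide) Hin
        have hscan : pyScanSub (c :: t) = '*' :: pyScanSub (t.drop 4) := by
          rw [pyScanSub]
          simp only [List.isPrefixOf_iff_prefix]
          rw [if_neg (by simpa using h1)]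
          rw [if_neg (by simpa using h2)]
          rw [if_neg (by simpa using h3)]
          rw [if_neg (by simpa using h4)]
          rw [if_pos (by simpa using h5)]
        rw [hcomp, hscan, hu]
        congr 1
        refine ih (t.drop 4) ?_ ?_
        · have h' : t.length ≤ n := by simpa using hlen
          have hd : (t.drop 4).length = t.length - 4 := List.length_drop
          omega
        · rw [← hu]; exact hbadu
      by_cases h6 : "multiplied by".toList <+: c :: t
      · -- phrase 6 matches at the head
        have hs : "multiplied by".toList ++ (c :: t).drop ("multiplied by".toList).length = c :: t :=
          List.prefix_iff_eq_append.mp h6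
        have hu : (c :: t).drop (("multiplied by".toList).length) = t.drop 12 := by
          rw [(by decide : ("multiplied by".toList).length = 13)]
          simp
        have hbadu : ¬ pvBad <:+: (c :: t).drop (("multiplied by".toList).length) := by
          intro hcon
          exact hbad (hcon.trans (List.IsSuffix.isInfix (List.drop_suffix _ _)))
        have hbads : ¬ pvBad <:+: "multiplied by".toList ++ (c :: t).drop (("multiplied by".toList).length) := by
          rw [hs]; exact hbad
        have Hin : ∀ pr ∈ ([("square root of".toList, '√'), ("raised to".toList, '^'), ("to the power of".toList, '^'), ("divided by".toList, '/'), ("times".toList, '*')] : List (List Char × Char)), ∀ j, j < ("multiplied by".toList).length →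
            ¬ pr.1 <+: (("multiplied by".toList).drop j ++ (c :: t).drop (("multiplied by".toList).length)) := by
          intro pr hpr
          simp only [List.mem_cons, List.not_mem_nil, or_false] at hpr
          rcases hpr with rfl|rfl|rfl|rfl|rfl
          · exact pvHin_of "multiplied by".toList "square root of".toList _ (by decide) hbads
          · exact pvHin_of "multiplied by".toList "raised to".toList _ (by decide) hbads
          · exact pvHin_of "multiplied by".toList "to the power of".toList _ (by decide) hbads
          · exact pvHin_of "multiplied by".toList "divided by".toList _ (by decide) hbads
          · exact pvHin_of "multiplied by".toList "times".toList _ (by decide) hbads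
        have hcomp : pvComp pvLP (c :: t) = '*' :: pvComp pvLP ((c :: t).drop (("multiplied by".toList).length)) := by
          conv_lhs => rw [← hs]
          exact pvComp_match [("square root of".toList, '√'), ("raised to".toList, '^'), ("to the power of".toList, '^'), ("divided by".toList, '/'), ("times".toList, '*')] [] "multiplied by".toList '*' _
            (by decide) (by decide) (by decide) (by decide) (by decide) Hin
        have hscan : pyScanSub (c :: t) = '*' :: pyScanSub (t.drop 12) := by
          rw [pyScanSub]
          simp only [List.isPrefixOf_iff_prefix]
          rw [if_neg (by simpa using h1)]
          rw [if_neg (by simpa using h2)]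
          rw [if_neg (by simpa using h3)]
          rw [if_neg (by simpa using h4)]
          rw [if_neg (by simpa using h5)]
          rw [if_pos (by simpa using h6)]
        rw [hcomp, hscan, hu]
        congr 1
        refine ih (t.drop 12) ?_ ?_
        · have h' : t.length ≤ n := by simpa using hlen
          have hd : (t.drop 12).length = t.length - 12 := List.length_drop
          omega
        · rw [← hu]; exact hbadu
      · -- no phrase matches at the head
        have hcomp : pvComp pvLP (c :: t) = c :: pvComp pvLP t := by
          refine pvComp_cons pvLP c t (by decide) (by decide) ?_
          intro pr hpr
          simp only [pvLP, List.mem_cons, List.not_mem_nil, or_false] at hpr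
          rcases hpr with rfl | rfl | rfl | rfl | rfl | rfl
          · exact h1
          · exact h2
          · exact h3
          · exact h4
          · exact h5
          · exact h6
        have hscan : pyScanSub (c :: t) = c :: pyScanSub t := by
          rw [pyScanSub]
          simp only [List.isPrefixOf_iff_prefix]
          rw [if_neg (by simpa using h1), if_neg (by simpa using h2), if_neg (by simpa using h3),
            if_neg (by simpa using h4), if_neg (by simpa using h5), if_neg (by simpa using h6)]
        rw [hcomp, hscan]
        congr 1
        refine ih t (by simpa using hlen) ?_
        intro hcon
        exact hbad (hcon.trans (List.IsSuffix.isInfix (List.suffix_cons c t)))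

theorem pvMain (s : List Char) (hbad : ¬ pvBad <:+: s) : pvComp pvLP s = pyScanSub s :=
  pvMainAux s.length s le_rfl hbad

theorem pvA_toList (text : String) :
    (normalize_math_phrases text).toList = pvComp pvLP text.toList := by
  have e1 : ("√" : String).toList = ['√'] := by decide
  have e2 : ("^" : String).toList = ['^'] := by decide
  have e3 : ("/" : String).toList = ['/'] := by decide
  have e4 : ("*" : String).toList = ['*'] := by decide
  simp only [normalize_math_phrases, List.foldl, pvComp, pvLP,
    PySem.Str.toList_replace]
  rw [pvReplace_eq _ _ _ (by decide), pvReplace_eq _ _ _ (by decide),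
    pvReplace_eq _ _ _ (by decide), pvReplace_eq _ _ _ (by decide),
    pvReplace_eq _ _ _ (by decide), pvReplace_eq _ _ _ (by decide)]
  rw [e1, e2, e3, e4]

theorem pvB_toList (text : String) :
    (normalize_math_phrases_alt text).toList = pyScanSub text.toList := by
  simp [normalize_math_phrases_alt]

-- ===== VERDICT (by name: the statement is the Claim_ definition above) =====
theorem normalize_math_phrases_spec : Claim_equal_normalize_math_phrases := by
  intro text hdom hpre
  unfold Spec_normalize_math_phrases
  unfold Pre_normalize_math_phrases at hpre
  rw [PySem.Str.isIn_eq] at hpre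
  have hbad : ¬ pvBad <:+: text.toList := (PySem.Chars.isIn_eq_false_iff _ _).mp hpre
  have h := pvMain text.toList hbad
  have hlist : (normalize_math_phrases text).toList = (normalize_math_phrases_alt text).toList := by
    rw [pvA_toList, pvB_toList, h]
  exact String.toList_inj.mp hlist
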